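-- pv_equiv track=rewrite | github.com/tian1144/stock-quant-trading | backend/app/services/auth_service.py | _find_user_by_login
-- ===== SOURCE A (Python) =====
-- def _normalize_login_value(login_id: str) -> str:
--     return str(login_id or "").strip().lower()
--
-- def _find_user_by_login(users: list, login_id: str) -> dict | None:
--     login_id = _normalize_login_value(login_id)
--     if not login_id:
--         return None
--     for user in users or []:
--         if login_id in {
--             str(user.get("phone") or "").strip().lower(),
--             str(user.get("account") or "").strip().lower(),
--             str(user.get("name") or "").strip().lower(),
--             str(user.get("email") or "").strip().lower(),
--         }:
--             return user
--     return None
-- ===== SOURCE B (Python) =====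
-- def _normalize_login_value(login_id: str) -> str:
--     return str(login_id or "").strip().lower()
--
-- def _find_user_by_login(users: list, login_id: str) -> dict | None:
--     login_id = _normalize_login_value(login_id)
--     if not login_id:
--         return None
--     index = {}
--     for user in users or []:
--         for field in ("phone", "account", "name", "email"):
--             key = str(user.get(field) or "").strip().lower()
--             if key not in index:
--                 index[key] = user
--     return index.get(login_id)
-- ===== Notes on version B (the rewrite author's own statement) =====
-- stated objective: alternative
-- what changed: Replaces A's early-returning per-user scan over a per-user set of four normalized fields with building a value-to-user dict index (inserting only when the key is absent so the earliest user wins) and a single lookup of the normalized login.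
import Mathlib
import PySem

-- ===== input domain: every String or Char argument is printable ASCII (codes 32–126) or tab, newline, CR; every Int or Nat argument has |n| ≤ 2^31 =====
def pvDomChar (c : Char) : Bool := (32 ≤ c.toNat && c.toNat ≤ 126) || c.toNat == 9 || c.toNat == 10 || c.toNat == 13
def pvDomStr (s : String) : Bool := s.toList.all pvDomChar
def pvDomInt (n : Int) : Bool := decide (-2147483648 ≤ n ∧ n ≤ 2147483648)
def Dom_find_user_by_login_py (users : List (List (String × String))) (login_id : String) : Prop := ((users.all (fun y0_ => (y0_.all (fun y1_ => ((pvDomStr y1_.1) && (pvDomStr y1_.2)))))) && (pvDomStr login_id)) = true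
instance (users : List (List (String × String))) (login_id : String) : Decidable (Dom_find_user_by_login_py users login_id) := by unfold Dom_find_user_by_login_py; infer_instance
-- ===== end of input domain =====

-- B replaces A's early-returning per-user scan with building a value->user index (first writer wins) and one lookup; return values proved equal, no speed claim.

-- ===== PORT A =====
-- Shared normalization helper (Python's _normalize_login_value / per-field str(..or "").strip().lower())
def pvNorm (s : String) : String := PySem.Str.lower (PySem.Str.strip s)

def pvNormField (u : List (String × String)) (f : String) : String :=
  pvNorm ((PySem.Dict.mk u).getD f "")

-- A's for-loop with early return
def pvFindLoop (users : List (List (String × String))) (lg : String) : Option (List (String × String)) :=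
  match users with
  | [] => none
  | u :: rest =>
    if PySem.Set.contains (PySem.Set.ofList
        [pvNormField u "phone", pvNormField u "account", pvNormField u "name", pvNormField u "email"]) lg
    then some u else pvFindLoop rest lg

def find_user_by_login_py (users : List (List (String × String))) (login_id : String) : Option (List (String × String)) :=
  let lg := pvNorm login_id
  if lg = "" then none else pvFindLoop users lg

-- ===== PORT B =====
-- B: insert each normalized field value into the index only when absent (earliest user wins)
def pvAddUser (d : PySem.Dict String (List (String × String))) (u : List (String × String)) :
    PySem.Dict String (List (String × String)) :=
  (["phone", "account", "name", "email"]).foldl (fun d f =>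
    let k := pvNormField u f
    if d.contains k then d else d.insert k u) d

def find_user_by_login_py_alt (users : List (List (String × String))) (login_id : String) : Option (List (String × String)) :=
  let lg := pvNorm login_id
  if lg = "" then none
  else (users.foldl pvAddUser PySem.Dict.empty).get? lg

-- ===== PRECONDITION & SPEC =====
def Spec_find_user_by_login_py (users : List (List (String × String))) (login_id : String) (out : Option (List (String × String))) : Prop := out = find_user_by_login_py_alt users login_id
instance (users : List (List (String × String))) (login_id : String) (out : Option (List (String × String))) : Decidable (Spec_find_user_by_login_py users login_id out) := by unfold Spec_find_user_by_login_py; infer_instance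

-- ===== CLAIM (what is proved, stated in full; the proofs are below) =====
def Claim_equal_find_user_by_login_py : Prop := ∀ (users : List (List (String × String))) (login_id : String), Dom_find_user_by_login_py users login_id → Spec_find_user_by_login_py users login_id (find_user_by_login_py users login_id)

-- ===== LEMMAS AND PROOFS =====

theorem pvStep_get? (d : PySem.Dict String (List (String × String))) (k : String)
    (u : List (String × String)) (lg : String) :
    (if d.contains k then d else d.insert k u).get? lg
      = (d.get? lg).or (if lg = k then some u else none) := by
  by_cases hc : d.contains k
  · simp only [hc, if_true]
    by_cases h : lg = k
    · subst h
      rw [PySem.Dict.contains_eq_isSome_get?] at hc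
      cases hg : d.get? lg with
      | none => rw [hg] at hc; simp at hc
      | some v => simp
    · simp [h]
  · simp only [hc, Bool.false_eq_true, if_false]
    rw [PySem.Dict.get?_insert]
    by_cases h : lg = k
    · subst h
      rw [PySem.Dict.contains_eq_isSome_get?] at hc
      cases hg : d.get? lg with
      | none => simp
      | some v => rw [hg] at hc; simp at hc
    · simp [h]

theorem pvOrIfs (p q : Prop) [Decidable p] [Decidable q]
    (u : List (String × String)) :
    ((if p then some u else none).or (if q then some u else none))
      = if p ∨ q then some u else none := by
  split_ifs <;> simp_all

theorem pvAddUser_get? (d : PySem.Dict String (List (String × String)))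
    (u : List (String × String)) (lg : String) :
    (pvAddUser d u).get? lg
      = (d.get? lg).or
          (if lg = pvNormField u "phone" ∨ lg = pvNormField u "account" ∨
              lg = pvNormField u "name" ∨ lg = pvNormField u "email"
           then some u else none) := by
  simp only [pvAddUser, List.foldl]
  rw [pvStep_get?, pvStep_get?, pvStep_get?, pvStep_get?]
  rw [Option.or_assoc, Option.or_assoc, Option.or_assoc]
  rw [pvOrIfs, pvOrIfs, pvOrIfs]

set_option maxHeartbeats 1000000 in
theorem pvSetContains (u : List (String × String)) (lg : String) :
    PySem.Set.contains (PySem.Set.ofList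
        [pvNormField u "phone", pvNormField u "account", pvNormField u "name", pvNormField u "email"]) lg
      = decide (lg = pvNormField u "phone" ∨ lg = pvNormField u "account" ∨
                lg = pvNormField u "name" ∨ lg = pvNormField u "email") := by
  simp only [PySem.Set.contains]
  rw [Bool.eq_iff_iff]
  simp [PySem.Set.mem_ofList]

theorem pvFold_get? (lg : String) (us : List (List (String × String)))
    (d : PySem.Dict String (List (String × String))) :
    (us.foldl pvAddUser d).get? lg = (d.get? lg).or (pvFindLoop us lg) := by
  induction us generalizing d with
  | nil => simp [pvFindLoop]
  | cons u rest ih =>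
    have hhit : ((if lg = pvNormField u "phone" ∨ lg = pvNormField u "account" ∨
        lg = pvNormField u "name" ∨ lg = pvNormField u "email"
        then some u else none).or (pvFindLoop rest lg)) = pvFindLoop (u :: rest) lg := by
      simp only [pvFindLoop, pvSetContains]
      by_cases h : lg = pvNormField u "phone" ∨ lg = pvNormField u "account" ∨
          lg = pvNormField u "name" ∨ lg = pvNormField u "email"
      · simp [h]
      · simp [h]
    rw [List.foldl_cons, ih, pvAddUser_get?, Option.or_assoc, hhit]

-- ===== VERDICT (by name: the statement is the Claim_ definition above) =====
theorem find_user_by_login_py_spec : Claim_equal_find_user_by_login_py := by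
  intro users login_id _
  unfold Spec_find_user_by_login_py find_user_by_login_py find_user_by_login_py_alt
  by_cases h : pvNorm login_id = ""
  · simp [h]
  · simp [h, pvFold_get? (pvNorm login_id) users PySem.Dict.empty]
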